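-- pv_equiv track=rewrite | github.com/ConcaveTrillion/pd-book-tools | pd_book_tools/ocr/label_normalization.py | normalize_word_component
-- ===== SOURCE A (Python) =====
-- from typing import Final, Optional
--
-- ALLOWED_WORD_COMPONENTS: Final[frozenset[str]] = frozenset(
--     {
--         "has superscript",
--         "has subscript",
--         "has starting footnote marker",
--         "has ending footnote marker",
--         "has drop cap",
--     }
-- )
--
-- WORD_COMPONENT_ALIASES: Final[dict[str, str]] = {
--     "superscript": "has superscript",
--     "subscript": "has subscript",
--     "start footnote marker": "has starting footnote marker",
--     "start footnote": "has starting footnote marker",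
--     "footnote start marker": "has starting footnote marker",
--     "starting footnote marker": "has starting footnote marker",
--     "has start footnote marker": "has starting footnote marker",
--     "end footnote marker": "has ending footnote marker",
--     "end footnote": "has ending footnote marker",
--     "footnote end marker": "has ending footnote marker",
--     "ending footnote marker": "has ending footnote marker",
--     "has end footnote marker": "has ending footnote marker",
--     "drop cap": "has drop cap",
--     "has dropcap": "has drop cap",
-- }
--
-- def _normalize_token(label: str) -> str:
--     return " ".join(label.strip().lower().replace("_", " ").replace("-", " ").split())
--
-- def normalize_word_component(component: str) -> str:
--     normalized = _normalize_token(component)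
--     normalized = WORD_COMPONENT_ALIASES.get(normalized, normalized)
--
--     if normalized not in ALLOWED_WORD_COMPONENTS:
--         compact = normalized.replace(" ", "")
--
--         for allowed_component in ALLOWED_WORD_COMPONENTS:
--             if compact == allowed_component.replace(" ", ""):
--                 normalized = allowed_component
--                 break
--
--         if normalized not in ALLOWED_WORD_COMPONENTS:
--             for alias, canonical in WORD_COMPONENT_ALIASES.items():
--                 if compact == alias.replace(" ", ""):
--                     normalized = canonical
--                     break
--
--     if normalized not in ALLOWED_WORD_COMPONENTS:
--         allowed = ", ".join(sorted(ALLOWED_WORD_COMPONENTS))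
--         raise ValueError(
--             f"Invalid word component '{component}'. Allowed components: {allowed}"
--         )
--     return normalized
-- ===== SOURCE B (Python) =====
-- # B: one single pass over the characters builds the compact key directly
-- # (lowercase, dropping whitespace/underscore/hyphen), then an if-chain of
-- # synonym groups decides the canonical component -- no staged string pipeline,
-- # no alias dict, no linear scans over the tables.
--
-- def normalize_word_component(component: str) -> str:
--     chars = []
--     for ch in component:
--         if not (ch.isspace() or ch == "_" or ch == "-"):
--             chars.append(ch.lower())
--     compact = "".join(chars)
--
--     if compact in ("superscript", "hassuperscript"):
--         return "has superscript"
--     if compact in ("subscript", "hassubscript"):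
--         return "has subscript"
--     if compact in ("startfootnotemarker", "startfootnote", "footnotestartmarker",
--                    "startingfootnotemarker", "hasstartfootnotemarker",
--                    "hasstartingfootnotemarker"):
--         return "has starting footnote marker"
--     if compact in ("endfootnotemarker", "endfootnote", "footnoteendmarker",
--                    "endingfootnotemarker", "hasendfootnotemarker",
--                    "hasendingfootnotemarker"):
--         return "has ending footnote marker"
--     if compact in ("dropcap", "hasdropcap"):
--         return "has drop cap"
--
--     raise ValueError(
--         "Invalid word component '{}'. Allowed components: {}".format(
--             component,
--             "has drop cap, has ending footnote marker, has starting footnote marker, "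
--             "has subscript, has superscript",
--         )
--     )
-- ===== Notes on version B (the rewrite author's own statement) =====
-- stated objective: alternative
-- what changed: B replaces A's five-stage string pipeline (strip/lower/replace/split/join), alias-dict lookup and two linear de-spaced scans over the tables by one single character pass that builds the compact key directly plus an if-chain over synonym groups.
import Mathlib
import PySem

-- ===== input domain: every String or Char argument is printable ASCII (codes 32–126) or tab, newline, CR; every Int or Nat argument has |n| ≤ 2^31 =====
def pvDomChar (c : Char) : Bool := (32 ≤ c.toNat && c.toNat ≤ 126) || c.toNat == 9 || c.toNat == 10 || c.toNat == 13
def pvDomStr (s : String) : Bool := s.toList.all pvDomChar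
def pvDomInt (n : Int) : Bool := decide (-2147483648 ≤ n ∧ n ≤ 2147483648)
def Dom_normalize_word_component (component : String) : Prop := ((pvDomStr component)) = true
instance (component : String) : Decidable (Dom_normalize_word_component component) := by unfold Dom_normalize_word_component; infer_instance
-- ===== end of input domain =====

-- B replaces A's staged string pipeline, alias-dict lookup and two linear de-spaced table scans
-- by one single character pass building the compact key plus an if-chain over synonym groups
-- (objective: alternative). Inputs on which the Python A raises ValueError are outside Pre_.

-- ===== PORT A =====
-- same-module constants / helper of A
def pvAllowedList : List String :=
  ["has superscript", "has subscript", "has starting footnote marker",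
   "has ending footnote marker", "has drop cap"]

def pvAllowed : PySem.Set String := PySem.Set.ofList pvAllowedList

def pvAliasPairs : List (String × String) :=
  [("superscript", "has superscript"),
   ("subscript", "has subscript"),
   ("start footnote marker", "has starting footnote marker"),
   ("start footnote", "has starting footnote marker"),
   ("footnote start marker", "has starting footnote marker"),
   ("starting footnote marker", "has starting footnote marker"),
   ("has start footnote marker", "has starting footnote marker"),
   ("end footnote marker", "has ending footnote marker"),
   ("end footnote", "has ending footnote marker"),
   ("footnote end marker", "has ending footnote marker"),
   ("ending footnote marker", "has ending footnote marker"),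
   ("has end footnote marker", "has ending footnote marker"),
   ("drop cap", "has drop cap"),
   ("has dropcap", "has drop cap")]

def pvAliases : PySem.Dict String String := PySem.Dict.ofList pvAliasPairs

-- _normalize_token: " ".join(label.strip().lower().replace("_", " ").replace("-", " ").split())
def pvNormalizeToken (label : String) : String :=
  PySem.Str.join " "
    (PySem.Str.split₀
      (PySem.Str.replace (PySem.Str.replace (PySem.Str.lower (PySem.Str.strip label)) "_" " ") "-" " "))

-- s.replace(" ", "")
def pvDespace (s : String) : String := PySem.Str.replace s " " ""

-- 'for allowed_component in ALLOWED_WORD_COMPONENTS: if compact == …: normalized = …; break'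
-- (frozenset iteration; at most one element can match since de-spaced forms are distinct,
-- so the break result does not depend on the iteration order; we scan the literal list)
def pvLoop1 (compact : String) : Option String :=
  pvAllowedList.find? (fun a => compact == pvDespace a)

-- 'for alias, canonical in WORD_COMPONENT_ALIASES.items(): if compact == …: normalized = canonical; break'
def pvLoop2 (compact : String) : Option String :=
  (pvAliasPairs.find? (fun p => compact == pvDespace p.1)).map (·.2)

def normalize_word_component (component : String) : String :=
  let normalized := pvNormalizeToken component
  let normalized := (pvAliases.get? normalized).getD normalized
  let normalized :=
    if pvAllowed.contains normalized then normalized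
    else
      let compact := pvDespace normalized
      let normalized := (pvLoop1 compact).getD normalized
      if pvAllowed.contains normalized then normalized
      else (pvLoop2 compact).getD normalized
  -- Python: 'if normalized not in ALLOWED_WORD_COMPONENTS: raise ValueError(…)'
  -- the raising inputs are exactly those outside Pre_; there the port just returns `normalized`
  normalized

-- ===== PORT B =====
-- the loop body's test: ch.isspace() or ch == "_" or ch == "-"
def pvDrop (c : Char) : Bool := PySem.Chars.isspace c || c == '_' || c == '-'

-- 'for ch in component: if not (…): chars.append(ch.lower())' then ''.join(chars)
def pvCompact : List Char → List Char
  | [] => []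
  | c :: t => if pvDrop c then pvCompact t else PySem.Chars.lowerChar c :: pvCompact t

def normalize_word_component_alt (component : String) : String :=
  let compact := String.ofList (pvCompact component.toList)
  if compact == "superscript" || compact == "hassuperscript" then "has superscript"
  else if compact == "subscript" || compact == "hassubscript" then "has subscript"
  else if compact == "startfootnotemarker" || compact == "startfootnote" ||
          compact == "footnotestartmarker" || compact == "startingfootnotemarker" ||
          compact == "hasstartfootnotemarker" || compact == "hasstartingfootnotemarker" then
    "has starting footnote marker"
  else if compact == "endfootnotemarker" || compact == "endfootnote" ||
          compact == "footnoteendmarker" || compact == "endingfootnotemarker" ||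
          compact == "hasendfootnotemarker" || compact == "hasendingfootnotemarker" then
    "has ending footnote marker"
  else if compact == "dropcap" || compact == "hasdropcap" then "has drop cap"
  else compact  -- Python: raise ValueError(…); excluded by Pre_

-- ===== PRECONDITION & SPEC =====
-- Pre_: the de-spaced normalized token of the input is one of the 18 recognised compact forms;
-- these are EXACTLY the inputs on which the Python A returns (on all others it raises ValueError).
def Pre_normalize_word_component (component : String) : Prop :=
  pvDespace (pvNormalizeToken component) ∈
    ["hassuperscript", "hassubscript", "hasstartingfootnotemarker",
     "hasendingfootnotemarker", "hasdropcap",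
     "superscript", "subscript", "startfootnotemarker", "startfootnote",
     "footnotestartmarker", "startingfootnotemarker", "hasstartfootnotemarker",
     "endfootnotemarker", "endfootnote", "footnoteendmarker",
     "endingfootnotemarker", "hasendfootnotemarker", "dropcap"]
instance (component : String) : Decidable (Pre_normalize_word_component component) := by
  unfold Pre_normalize_word_component; infer_instance

def pvWitness_normalize_word_component : String := " Has_Drop-Cap "

def Spec_normalize_word_component (component : String) (out : String) : Prop :=
  out = normalize_word_component_alt component
instance (component : String) (out : String) : Decidable (Spec_normalize_word_component component out) := by
  unfold Spec_normalize_word_component; infer_instance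

-- ===== CLAIM (what is proved, stated in full; the proofs are below) =====
def Claim_equal_normalize_word_component : Prop :=
  ∀ (component : String), Dom_normalize_word_component component →
    Pre_normalize_word_component component →
    Spec_normalize_word_component component (normalize_word_component component)

-- ===== LEMMAS AND PROOFS =====

-- proof-side name for B's decision chain (definitionally the if-chain of the B port)
def pvChain (compact : String) : String :=
  if compact == "superscript" || compact == "hassuperscript" then "has superscript"
  else if compact == "subscript" || compact == "hassubscript" then "has subscript"
  else if compact == "startfootnotemarker" || compact == "startfootnote" ||
          compact == "footnotestartmarker" || compact == "startingfootnotemarker" ||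
          compact == "hasstartfootnotemarker" || compact == "hasstartingfootnotemarker" then
    "has starting footnote marker"
  else if compact == "endfootnotemarker" || compact == "endfootnote" ||
          compact == "footnoteendmarker" || compact == "endingfootnotemarker" ||
          compact == "hasendfootnotemarker" || compact == "hasendingfootnotemarker" then
    "has ending footnote marker"
  else if compact == "dropcap" || compact == "hasdropcap" then "has drop cap"
  else compact

theorem pv_alt_eq (s : String) :
    normalize_word_component_alt s = pvChain (String.ofList (pvCompact s.toList)) := rfl

-- ---- character-level facts ----

theorem pv_upper_bounds (c : Char) (h : PySem.Chars.isupper c = true) :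
    65 ≤ c.toNat ∧ c.toNat ≤ 90 := by
  simp [PySem.Chars.isupper] at h
  exact ⟨Char.le_def.mp h.1, Char.le_def.mp h.2⟩

theorem pv_lowerChar_toNat (c : Char) (h : PySem.Chars.isupper c = true) :
    (PySem.Chars.lowerChar c).toNat = c.toNat + 32 := by
  have hb := pv_upper_bounds c h
  simp only [PySem.Chars.lowerChar, h, if_true]
  rw [Char.toNat_ofNat]
  have hv : (c.toNat + 32).isValidChar := Or.inl (by omega)
  simp [hv]

theorem pv_toNat_ne (c : Char) (d : Char) (h : c.toNat ≠ d.toNat) : (c == d) = false := by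
  simp only [beq_eq_false_iff_ne]
  intro he; exact h (by rw [he])

theorem pv_isspace_of_bounds (c : Char) (h1 : 97 ≤ c.toNat) (h2 : c.toNat ≤ 122) :
    PySem.Chars.isspace c = false := by
  simp [PySem.Chars.isspace]; omega

theorem pv_isspace_of_upper (c : Char) (h : PySem.Chars.isupper c = true) :
    PySem.Chars.isspace c = false := by
  have hb := pv_upper_bounds c h
  simp [PySem.Chars.isspace]; omega

-- substitution maps of the two replace("_"," ") / replace("-"," ") steps
def pvG1 (c : Char) : Char := if c = '_' then ' ' else c
def pvG2 (c : Char) : Char := if c = '-' then ' ' else c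

theorem pv_char_space (c : Char) :
    PySem.Chars.isspace (pvG2 (pvG1 (PySem.Chars.lowerChar c))) = pvDrop c := by
  by_cases hu : PySem.Chars.isupper c = true
  · have hn := pv_lowerChar_toNat c hu
    have hb := pv_upper_bounds c hu
    have h95 : ('_' : Char).toNat = 95 := by decide
    have h45 : ('-' : Char).toNat = 45 := by decide
    have h1 : (PySem.Chars.lowerChar c) ≠ '_' := by
      intro he; have := congrArg Char.toNat he; omega
    have h2 : (PySem.Chars.lowerChar c) ≠ '-' := by
      intro he; have := congrArg Char.toNat he; omega
    have h3 : PySem.Chars.isspace (PySem.Chars.lowerChar c) = false :=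
      pv_isspace_of_bounds _ (by omega) (by omega)
    have h4 : (c == '_') = false := pv_toNat_ne c '_' (by rw [h95]; omega)
    have h5 : (c == '-') = false := pv_toNat_ne c '-' (by rw [h45]; omega)
    simp [pvG1, pvG2, pvDrop, h1, h2, h3, h4, h5, pv_isspace_of_upper c hu]
  · have hl : PySem.Chars.lowerChar c = c := by
      simp [PySem.Chars.lowerChar, Bool.eq_false_iff.mpr hu]
    rw [hl]
    by_cases h1 : c = '_'
    · subst h1; simp [pvG1, pvG2, pvDrop]; decide
    by_cases h2 : c = '-'
    · subst h2; simp [pvG1, pvG2, pvDrop]; decide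
    · simp [pvG1, pvG2, pvDrop, h1, h2, beq_eq_false_iff_ne.mpr h1, beq_eq_false_iff_ne.mpr h2]

theorem pv_char_keep (c : Char) (h : pvDrop c = false) :
    pvG2 (pvG1 (PySem.Chars.lowerChar c)) = PySem.Chars.lowerChar c := by
  by_cases hu : PySem.Chars.isupper c = true
  · have hn := pv_lowerChar_toNat c hu
    have hb := pv_upper_bounds c hu
    have h95 : ('_' : Char).toNat = 95 := by decide
    have h45 : ('-' : Char).toNat = 45 := by decide
    have h1 : (PySem.Chars.lowerChar c) ≠ '_' := by
      intro he; have := congrArg Char.toNat he; omega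
    have h2 : (PySem.Chars.lowerChar c) ≠ '-' := by
      intro he; have := congrArg Char.toNat he; omega
    simp [pvG1, pvG2, h1, h2]
  · have hl : PySem.Chars.lowerChar c = c := by
      simp [PySem.Chars.lowerChar, Bool.eq_false_iff.mpr hu]
    simp only [pvDrop, Bool.or_eq_false_iff, beq_eq_false_iff_ne] at h
    rw [hl]; simp [pvG1, pvG2, h.1.2, h.2]

-- ---- replace with a single-character pattern ----

theorem pv_replace_go (p : Char) (new : List Char) :
    ∀ (l : List Char) (fuel : Nat) (acc : List Char), l.length ≤ fuel →
      PySem.Chars.replace.go [p] new fuel l acc =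
        acc.reverse ++ l.flatMap (fun c => if c = p then new else [c]) := by
  intro l
  induction l with
  | nil =>
    intro fuel acc _
    cases fuel <;> simp [PySem.Chars.replace.go]
  | cons c t ih =>
    intro fuel acc hlen
    cases fuel with
    | zero => simp at hlen
    | succ fuel =>
      simp only [PySem.Chars.replace.go]
      by_cases hc : c = p
      · subst hc
        have hpre : List.isPrefixOf [c] (c :: t) = true := by simp [List.isPrefixOf]
        simp only [hpre, if_true, List.length_cons, List.drop_succ_cons, List.length_nil, List.drop_zero]
        rw [ih fuel _ (by simpa using hlen)]
        simp
      · have hpre : List.isPrefixOf [p] (c :: t) = false := by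
          simp [List.isPrefixOf]
          exact fun he => absurd he.symm hc
        simp only [hpre, Bool.false_eq_true, if_false]
        rw [ih fuel _ (by simpa using hlen)]
        simp [hc]

theorem pv_replace_single (p : Char) (new l : List Char) :
    PySem.Chars.replace l [p] new = l.flatMap (fun c => if c = p then new else [c]) := by
  simp only [PySem.Chars.replace, List.isEmpty_cons, Bool.false_eq_true, if_false]
  simpa using pv_replace_go p new l l.length [] le_rfl

theorem pv_flatMap_single (p q : Char) (l : List Char) :
    l.flatMap (fun c => if c = p then [q] else [c]) =
      l.map (fun c => if c = p then q else c) := by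
  induction l with
  | nil => simp
  | cons c t ih => by_cases hc : c = p <;> simp [hc, ih]

theorem pv_flatMap_id (l : List Char) (h : ∀ c ∈ l, c ≠ ' ') :
    l.flatMap (fun c => if c = ' ' then ([] : List Char) else [c]) = l := by
  induction l with
  | nil => simp
  | cons c t ih =>
    have hc := h c (by simp)
    simp [hc, ih fun c hc => h c (by simp [hc])]

-- ---- split₀ ----

theorem pv_split_go :
    ∀ (l cur : List Char) (accs : List (List Char)),
      (∀ c ∈ cur, PySem.Chars.isspace c = false) →
      (∀ p ∈ accs, ∀ c ∈ p, PySem.Chars.isspace c = false) →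
      (∀ p ∈ PySem.Chars.split₀.go l cur accs, ∀ c ∈ p, PySem.Chars.isspace c = false) ∧
      (PySem.Chars.split₀.go l cur accs).flatten =
        accs.reverse.flatten ++ cur.reverse ++ l.filter (fun c => !PySem.Chars.isspace c) := by
  intro l
  induction l with
  | nil =>
    intro cur accs hcur haccs
    by_cases hc : cur.isEmpty
    · have he : cur = [] := by simpa using hc
      subst he
      simp only [PySem.Chars.split₀.go, List.isEmpty_nil, if_true]
      constructor
      · intro p hp; exact haccs p (by simpa using hp)
      · simp
    · simp only [PySem.Chars.split₀.go, hc, Bool.false_eq_true, if_false]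
      constructor
      · intro p hp c hcp
        rcases (by simpa using hp : p ∈ accs ∨ p = cur.reverse) with h | h
        · exact haccs p h c hcp
        · exact hcur c (by simpa [h] using hcp)
      · simp
  | cons c rest ih =>
    intro cur accs hcur haccs
    by_cases hs : PySem.Chars.isspace c = true
    · by_cases hc : cur.isEmpty
      · have he : cur = [] := by simpa using hc
        subst he
        simp only [PySem.Chars.split₀.go, hs, if_true, List.isEmpty_nil]
        have := ih [] accs (by simp) haccs
        refine ⟨this.1, ?_⟩
        rw [this.2]
        simp [hs]
      · simp only [PySem.Chars.split₀.go, hs, if_true, hc, Bool.false_eq_true, if_false]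
        have haccs' : ∀ p ∈ cur.reverse :: accs, ∀ c ∈ p, PySem.Chars.isspace c = false := by
          intro p hp d hd
          rcases List.mem_cons.mp hp with h | h
          · exact hcur d (by simpa [h] using hd)
          · exact haccs p h d hd
        have := ih [] (cur.reverse :: accs) (by simp) haccs'
        refine ⟨this.1, ?_⟩
        rw [this.2]
        simp [hs]
    · simp only [PySem.Chars.split₀.go, hs, Bool.false_eq_true, if_false]
      have hcur' : ∀ d ∈ c :: cur, PySem.Chars.isspace d = false := by
        intro d hd
        rcases List.mem_cons.mp hd with h | h
        · rw [h]; simpa using hs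
        · exact hcur d h
      have := ih (c :: cur) accs hcur' haccs
      refine ⟨this.1, ?_⟩
      rw [this.2]
      simp [hs]

theorem pv_split₀_nospace (l : List Char) :
    ∀ p ∈ PySem.Chars.split₀ l, ∀ c ∈ p, PySem.Chars.isspace c = false := by
  have := pv_split_go l [] [] (by simp) (by simp)
  simpa [PySem.Chars.split₀] using this.1

theorem pv_split₀_flatten (l : List Char) :
    (PySem.Chars.split₀ l).flatten = l.filter (fun c => !PySem.Chars.isspace c) := by
  have := pv_split_go l [] [] (by simp) (by simp)
  simpa [PySem.Chars.split₀] using this.2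

theorem pv_intercalate (parts : List (List Char))
    (h : ∀ p ∈ parts, ∀ c ∈ p, PySem.Chars.isspace c = false) :
    (List.intercalate [' '] parts).flatMap
        (fun c => if c = ' ' then ([] : List Char) else [c]) = parts.flatten := by
  induction parts with
  | nil => simp [List.intercalate]
  | cons p rest ih =>
    have hp : ∀ c ∈ p, c ≠ ' ' := by
      intro c hc he
      have := h p (by simp) c hc
      rw [he] at this; simp [PySem.Chars.isspace] at this
    cases rest with
    | nil =>
      have h1 : List.intercalate [' '] [p] = p := by simp [List.intercalate]
      rw [h1, pv_flatMap_id p hp]; simp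
    | cons q rest' =>
      have h1 : List.intercalate [' '] (p :: q :: rest') =
          p ++ [' '] ++ List.intercalate [' '] (q :: rest') := by
        simp [List.intercalate, List.intersperse]
      rw [h1]
      simp only [List.flatMap_append]
      rw [pv_flatMap_id p hp, ih (fun r hr => h r (by simp [hr]))]
      simp

-- ---- assembling the bridge ----

theorem pv_compact_eq (l : List Char) :
    pvCompact l = (l.filter (fun c => !pvDrop c)).map PySem.Chars.lowerChar := by
  induction l with
  | nil => simp [pvCompact]
  | cons c t ih => by_cases hc : pvDrop c <;> simp [pvCompact, hc, ih]

theorem pv_filter_dropWhile (l : List Char) :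
    (l.dropWhile PySem.Chars.isspace).filter (fun c => !pvDrop c) =
      l.filter (fun c => !pvDrop c) := by
  induction l with
  | nil => simp
  | cons c t ih =>
    by_cases hc : PySem.Chars.isspace c
    · have : pvDrop c = true := by simp [pvDrop, hc]
      simp [List.dropWhile, hc, this, ih]
    · simp [List.dropWhile, hc]

theorem pv_filter_strip (l : List Char) :
    (PySem.Chars.strip l).filter (fun c => !pvDrop c) = l.filter (fun c => !pvDrop c) := by
  unfold PySem.Chars.strip PySem.Chars.rstrip PySem.Chars.lstrip
  rw [List.filter_reverse, pv_filter_dropWhile, List.filter_reverse, List.reverse_reverse,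
      pv_filter_dropWhile]

theorem pv_replace_underscore (l : List Char) :
    PySem.Chars.replace l ['_'] [' '] = l.map pvG1 := by
  rw [pv_replace_single, pv_flatMap_single]; rfl

theorem pv_replace_hyphen (l : List Char) :
    PySem.Chars.replace l ['-'] [' '] = l.map pvG2 := by
  rw [pv_replace_single, pv_flatMap_single]; rfl

theorem pv_bridge_list (l : List Char) :
    PySem.Chars.replace
        (PySem.Chars.join [' ']
          (PySem.Chars.split₀
            (PySem.Chars.replace
              (PySem.Chars.replace (PySem.Chars.lower (PySem.Chars.strip l)) ['_'] [' ']) ['-'] [' '])))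
        [' '] [] = pvCompact l := by
  rw [pv_replace_single, pv_replace_underscore, pv_replace_hyphen]
  simp only [PySem.Chars.join]
  rw [pv_intercalate _ (pv_split₀_nospace _), pv_split₀_flatten]
  simp only [PySem.Chars.lower, List.map_map, List.filter_map]
  have hfun : ((fun c => !PySem.Chars.isspace c) ∘ (pvG2 ∘ pvG1 ∘ PySem.Chars.lowerChar)) =
      (fun c => !pvDrop c) := by
    funext c
    simp only [Function.comp_apply]
    rw [pv_char_space]
  rw [hfun, pv_filter_strip, pv_compact_eq]
  exact List.map_congr_left fun c hc => by
    have hk : pvDrop c = false := by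
      have := List.of_mem_filter hc
      simpa using this
    simp only [Function.comp_apply]
    exact pv_char_keep c hk

theorem pv_bridge (s : String) :
    String.ofList (pvCompact s.toList) = pvDespace (pvNormalizeToken s) := by
  unfold pvDespace pvNormalizeToken
  simp only [PySem.Str.replace, PySem.Str.join, PySem.Str.split₀, PySem.Str.lower,
    PySem.Str.strip, String.toList_ofList, List.map_map]
  have h1 : (" " : String).toList = [' '] := rfl
  have h2 : ("_" : String).toList = ['_'] := rfl
  have h3 : ("-" : String).toList = ['-'] := rfl
  have h4 : ("" : String).toList = [] := rfl
  rw [h1, h2, h3, h4]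
  have h5 : (List.map (String.toList ∘ String.ofList)
      (PySem.Chars.split₀
        (PySem.Chars.replace
          (PySem.Chars.replace (PySem.Chars.lower (PySem.Chars.strip s.toList)) ['_'] [' '])
          ['-'] [' ']))) =
      (PySem.Chars.split₀
        (PySem.Chars.replace
          (PySem.Chars.replace (PySem.Chars.lower (PySem.Chars.strip s.toList)) ['_'] [' '])
          ['-'] [' '])) := by
    rw [show (String.toList ∘ String.ofList) = (id : List Char → List Char) from
      funext fun p => String.toList_ofList, List.map_id]
  rw [h5, pv_bridge_list]

-- ---- the 18 accepted compact forms, case by case ----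

-- else-branch step where the first de-spaced scan (over the allowed set) hits
theorem pv_case1 (n L a : String) (hL : pvDespace n = L)
    (hget : pvAliases.get? n = none) (hcon : pvAllowed.contains n = false)
    (h1 : pvLoop1 L = some a) (ha : pvAllowed.contains a = true)
    (h3 : pvChain L = a) :
    (let n1 := (pvAliases.get? n).getD n
     if pvAllowed.contains n1 then n1
     else
       let compact := pvDespace n1
       let n2 := (pvLoop1 compact).getD n1
       if pvAllowed.contains n2 then n2
       else (pvLoop2 compact).getD n2) = pvChain (pvDespace n) := by
  simp only [hget, Option.getD_none, hcon, hL, h1, Option.getD_some, ha, h3,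
    Bool.false_eq_true, if_false, if_true]

-- else-branch step where only the second de-spaced scan (over the aliases) hits
theorem pv_case2 (n L c : String) (hL : pvDespace n = L)
    (hget : pvAliases.get? n = none) (hcon : pvAllowed.contains n = false)
    (h1 : pvLoop1 L = none) (h2 : pvLoop2 L = some c)
    (h3 : pvChain L = c) :
    (let n1 := (pvAliases.get? n).getD n
     if pvAllowed.contains n1 then n1
     else
       let compact := pvDespace n1
       let n2 := (pvLoop1 compact).getD n1
       if pvAllowed.contains n2 then n2
       else (pvLoop2 compact).getD n2) = pvChain (pvDespace n) := by
  simp only [hget, Option.getD_none, hcon, hL, h1, h2, Option.getD_some, h3,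
    Bool.false_eq_true, if_false]

set_option maxHeartbeats 2000000 in
theorem pv_main (n : String)
    (h : pvDespace n ∈
      ["hassuperscript", "hassubscript", "hasstartingfootnotemarker",
       "hasendingfootnotemarker", "hasdropcap",
       "superscript", "subscript", "startfootnotemarker", "startfootnote",
       "footnotestartmarker", "startingfootnotemarker", "hasstartfootnotemarker",
       "endfootnotemarker", "endfootnote", "footnoteendmarker",
       "endingfootnotemarker", "hasendfootnotemarker", "dropcap"]) :
    (let n1 := (pvAliases.get? n).getD n
     if pvAllowed.contains n1 then n1
     else
       let compact := pvDespace n1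
       let n2 := (pvLoop1 compact).getD n1
       if pvAllowed.contains n2 then n2
       else (pvLoop2 compact).getD n2) = pvChain (pvDespace n) := by
  by_cases hAl : n ∈ pvAllowedList
  · fin_cases hAl <;> decide
  by_cases hAli : n ∈ pvAliasPairs.map Prod.fst
  · fin_cases hAli <;> decide
  have hget : pvAliases.get? n = none :=
    (PySem.Dict.get?_eq_none_iff_not_mem_keys pvAliases n).mpr
      (by rw [show pvAliases.keys = pvAliasPairs.map Prod.fst from by decide]; exact hAli)
  have hcon : pvAllowed.contains n = false := by
    cases hc : pvAllowed.contains n with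
    | false => rfl
    | true =>
      exact absurd ((PySem.Set.mem_ofList pvAllowedList n).mp
        ((PySem.Set.contains_iff pvAllowed n).mp hc)) hAl
  simp only [List.mem_cons, List.not_mem_nil, or_false] at h
  rcases h with h | h | h | h | h | h | h | h | h | h | h | h | h | h | h | h | h | h
  · exact pv_case1 n _ "has superscript" h hget hcon rfl rfl (by decide)
  · exact pv_case1 n _ "has subscript" h hget hcon rfl rfl (by decide)
  · exact pv_case1 n _ "has starting footnote marker" h hget hcon rfl rfl (by decide)
  · exact pv_case1 n _ "has ending footnote marker" h hget hcon rfl rfl (by decide)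
  · exact pv_case1 n _ "has drop cap" h hget hcon rfl rfl (by decide)
  · exact pv_case2 n _ "has superscript" h hget hcon rfl rfl (by decide)
  · exact pv_case2 n _ "has subscript" h hget hcon rfl rfl (by decide)
  · exact pv_case2 n _ "has starting footnote marker" h hget hcon rfl rfl (by decide)
  · exact pv_case2 n _ "has starting footnote marker" h hget hcon rfl rfl (by decide)
  · exact pv_case2 n _ "has starting footnote marker" h hget hcon rfl rfl (by decide)
  · exact pv_case2 n _ "has starting footnote marker" h hget hcon rfl rfl (by decide)
  · exact pv_case2 n _ "has starting footnote marker" h hget hcon rfl rfl (by decide)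
  · exact pv_case2 n _ "has ending footnote marker" h hget hcon rfl rfl (by decide)
  · exact pv_case2 n _ "has ending footnote marker" h hget hcon rfl rfl (by decide)
  · exact pv_case2 n _ "has ending footnote marker" h hget hcon rfl rfl (by decide)
  · exact pv_case2 n _ "has ending footnote marker" h hget hcon rfl rfl (by decide)
  · exact pv_case2 n _ "has ending footnote marker" h hget hcon rfl rfl (by decide)
  · exact pv_case2 n _ "has drop cap" h hget hcon rfl rfl (by decide)

-- ===== VERDICT (by name: the statement is the Claim_ definition above) =====
theorem normalize_word_component_spec : Claim_equal_normalize_word_component := by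
  intro component _ hPre
  unfold Spec_normalize_word_component
  rw [pv_alt_eq, pv_bridge]
  unfold normalize_word_component
  unfold Pre_normalize_word_component at hPre
  exact pv_main (pvNormalizeToken component) hPre
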